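-- pv_equiv track=rewrite | github.com/ValentinLaTortue/Projet-Planning- | PremierCode2.py | emploiDuTemps
-- ===== SOURCE A (Python) =====
-- def emploiDuTemps(dico_matiere):
--     jours = ["lundi", "mardi", "mercredi", "jeudi", "vendredi", "samedi"]
--
--     # Trouver la dernière clé du dictionnaire
--     last_key = max(dico_matiere.keys())
--
--     # Calculer le reste de la division par 5
--     reste = last_key % 5
--
--     # Arrondir à l'entier supérieur si le reste n'est pas 0
--     if reste != 0:
--         reste_arrondi = (last_key // 5) + 1
--     else:
--         reste_arrondi = last_key // 5
--
--     # Si le reste est supérieur ou égal à 4, ajouter samedi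
--     if reste >= 4:
--         jours.append("samedi")
--
--     # Créer un nouveau dictionnaire pour l'emploi du temps
--     emploi = {}
--
--     for jour in jours:
--         emploi[f"{jour}"] = []
--
--     # Remplir le dictionnaire avec les "reste" sous-tableaux pour chaque jour
--     index = 1
--     for jour in jours:
--         for _ in range(reste_arrondi): # o utilise _ car on n'a pas besoin de l'index d'itération
--             if index in dico_matiere:
--                 emploi[jour].append(dico_matiere[index])
--                 index += 1
--             else:
--                 break
--
--     return emploi
-- ===== SOURCE B (Python) =====
-- def emploiDuTemps(dico_matiere):
--     jours = ["lundi", "mardi", "mercredi", "jeudi", "vendredi", "samedi"]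
--
--     last_key = max(dico_matiere.keys())
--     reste = last_key % 5
--     reste_arrondi = last_key // 5 + (1 if reste != 0 else 0)
--     if reste >= 4:
--         jours.append("samedi")
--
--     # Collect the contiguous run of values keyed 1, 2, 3, ... (capped at full capacity),
--     # then hand each day its slice of that run.
--     step = max(reste_arrondi, 0)
--     run = []
--     for i in range(1, len(jours) * step + 1):
--         if i not in dico_matiere:
--             break
--         run.append(dico_matiere[i])
--
--     emploi = {jour: [] for jour in jours}
--     for idx, jour in enumerate(jours):
--         emploi[jour] += run[idx * step:(idx + 1) * step]
--     return emploi
-- ===== Notes on version B (the rewrite author's own statement) =====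
-- stated objective: alternative
-- what changed: Replaces A's stateful nested fill loop (a shared index threaded through a per-day bounded inner loop) by first collecting the contiguous run of values keyed 1,2,3,... and then giving each day its slice run[idx*step:(idx+1)*step] of that run.
import Mathlib
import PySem

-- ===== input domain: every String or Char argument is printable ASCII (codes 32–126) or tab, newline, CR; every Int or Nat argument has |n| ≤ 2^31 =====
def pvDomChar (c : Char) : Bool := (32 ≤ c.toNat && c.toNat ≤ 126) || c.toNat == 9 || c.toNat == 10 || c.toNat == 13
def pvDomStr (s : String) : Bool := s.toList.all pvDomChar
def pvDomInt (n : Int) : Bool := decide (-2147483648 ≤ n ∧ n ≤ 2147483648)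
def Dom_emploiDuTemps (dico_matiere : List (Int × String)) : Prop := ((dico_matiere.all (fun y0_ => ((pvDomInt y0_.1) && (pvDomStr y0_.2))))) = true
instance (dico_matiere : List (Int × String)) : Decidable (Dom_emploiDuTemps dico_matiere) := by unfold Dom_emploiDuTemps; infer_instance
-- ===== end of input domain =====

-- B replaces A's stateful nested fill loop by "collect the contiguous run of values, then slice it
-- per day" (objective: alternative decomposition, same cost). Equivalence of the RETURN value only.

-- ===== PORT A =====
-- the inner `for _ in range(reste_arrondi): if index in dico: append; index += 1 else: break`
-- loop, threading the (emploi, index) state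
def pvInnerA (d : PySem.Dict Int String) (jour : String) :
    Nat → PySem.Dict String (List String) × Int → PySem.Dict String (List String) × Int
  | 0, s => s
  | Nat.succ n, s =>
    match d.get? s.2 with
    | some v => pvInnerA d jour n (s.1.modify jour [] (fun l => l ++ [v]), s.2 + 1)
    | none => s

def emploiDuTemps (dico_matiere : List (Int × String)) : List (String × List String) :=
  let jours0 : List String := ["lundi", "mardi", "mercredi", "jeudi", "vendredi", "samedi"]
  let d := PySem.Dict.ofList dico_matiere
  match PySem.List.max? d.keys (fun x => x) with
  | none => []  -- max() on an empty dict raises ValueError; excluded by Pre_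
  | some last_key =>
    let reste := PySem.Int.mod last_key 5
    let reste_arrondi := if reste ≠ 0 then PySem.Int.floordiv last_key 5 + 1
                         else PySem.Int.floordiv last_key 5
    let jours := if reste ≥ 4 then jours0 ++ ["samedi"] else jours0
    let emploi0 := jours.foldl (fun e j => e.insert j ([] : List String)) PySem.Dict.empty
    let final := jours.foldl (fun s jour => pvInnerA d jour reste_arrondi.toNat s) (emploi0, (1 : Int))
    final.1.items

-- ===== PORT B =====
-- the `for i in range(1, len(jours)*step+1): if i not in dico: break; run.append(dico[i])` loop
def pvRunB (d : PySem.Dict Int String) : Int → Nat → List String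
  | _, 0 => []
  | i, Nat.succ n =>
    match d.get? i with
    | some v => v :: pvRunB d (i + 1) n
    | none => []

def emploiDuTemps_alt (dico_matiere : List (Int × String)) : List (String × List String) :=
  let jours0 : List String := ["lundi", "mardi", "mercredi", "jeudi", "vendredi", "samedi"]
  let d := PySem.Dict.ofList dico_matiere
  match PySem.List.max? d.keys (fun x => x) with
  | none => []  -- max() on an empty dict raises ValueError; excluded by Pre_
  | some last_key =>
    let reste := PySem.Int.mod last_key 5
    let reste_arrondi := PySem.Int.floordiv last_key 5 + (if reste ≠ 0 then 1 else 0)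
    let jours := if 4 ≤ reste then jours0 ++ ["samedi"] else jours0
    let step := (max reste_arrondi 0).toNat
    let run := pvRunB d 1 (jours.length * step)
    let emploi0 := jours.foldl (fun e j => e.insert j ([] : List String)) PySem.Dict.empty
    -- for idx, jour in enumerate(jours): emploi[jour] += run[idx*step:(idx+1)*step]
    let final := jours.foldl
      (fun (p : PySem.Dict String (List String) × Nat) jour =>
        (p.1.modify jour []
          (fun l => l ++ PySem.List.slice run (some ((p.2 * step : Nat) : Int))
                                              (some (((p.2 + 1) * step : Nat) : Int))),
         p.2 + 1))
      (emploi0, 0)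
    final.1.items

-- ===== PRECONDITION & SPEC =====
-- Pre_ excludes only the empty dict, on which A's max() raises ValueError.
def Pre_emploiDuTemps (dico_matiere : List (Int × String)) : Prop := dico_matiere ≠ []
instance (dico_matiere : List (Int × String)) : Decidable (Pre_emploiDuTemps dico_matiere) := by
  unfold Pre_emploiDuTemps; infer_instance

def pvWitness_emploiDuTemps : (List (Int × String)) := [((1 : Int), "maths")]

def Spec_emploiDuTemps (dico_matiere : List (Int × String)) (out : List (String × List String)) : Prop :=
  out = emploiDuTemps_alt dico_matiere
instance (dico_matiere : List (Int × String)) (out : List (String × List String)) :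
    Decidable (Spec_emploiDuTemps dico_matiere out) := by
  unfold Spec_emploiDuTemps; infer_instance

-- ===== CLAIM (what is proved, stated in full; the proofs are below) =====
def Claim_equal_emploiDuTemps : Prop :=
  ∀ (dico_matiere : List (Int × String)), Dom_emploiDuTemps dico_matiere →
    Pre_emploiDuTemps dico_matiere →
    Spec_emploiDuTemps dico_matiere (emploiDuTemps dico_matiere)

-- ===== LEMMAS AND PROOFS =====

theorem pvRunB_len_le (d : PySem.Dict Int String) :
    ∀ (n : Nat) (i : Int), (pvRunB d i n).length ≤ n := by
  intro n
  induction n with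
  | zero => intro i; simp [pvRunB]
  | succ n ih =>
    intro i
    simp only [pvRunB]
    cases d.get? i with
    | some v => simpa using Nat.succ_le_succ (ih (i + 1))
    | none => simp

theorem pvRunB_take (d : PySem.Dict Int String) :
    ∀ (t m : Nat) (i : Int), t ≤ m → pvRunB d i t = (pvRunB d i m).take t := by
  intro t
  induction t with
  | zero => intro m i _; simp [pvRunB]
  | succ t ih =>
    intro m i h
    obtain ⟨m', rfl⟩ : ∃ m', m = m' + 1 := ⟨m - 1, by omega⟩
    simp only [pvRunB]
    cases d.get? i with
    | some v => simp [ih m' (i + 1) (by omega)]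
    | none => simp

theorem pvRunB_split (d : PySem.Dict Int String) :
    ∀ (k m : Nat) (i : Int), (pvRunB d i k).length = k →
      pvRunB d i (k + m) = pvRunB d i k ++ pvRunB d (i + (k : Int)) m := by
  intro k
  induction k with
  | zero => intro m i _; rw [Nat.zero_add]; simp [pvRunB]
  | succ k ih =>
    intro m i hlen
    have hstep : k + 1 + m = (k + m) + 1 := by omega
    rw [hstep]
    simp only [pvRunB] at hlen ⊢
    cases hg : d.get? i with
    | some v =>
      simp only [hg, List.length_cons] at hlen ⊢
      have := ih m (i + 1) (by omega)
      rw [this]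
      simp only [List.cons_append, List.cons.injEq, true_and]
      congr 2
      push_cast
      ring
    | none => simp [hg] at hlen

theorem pvRunB_stop (d : PySem.Dict Int String) :
    ∀ (n : Nat) (i : Int), (pvRunB d i n).length < n →
      ∀ m, pvRunB d (i + ((pvRunB d i n).length : Int)) m = [] := by
  intro n
  induction n with
  | zero => intro i h; omega
  | succ n ih =>
    intro i h m
    simp only [pvRunB] at h ⊢
    cases hg : d.get? i with
    | some v =>
      simp only [hg] at h ⊢
      simp only [List.length_cons] at h ⊢
      have := ih (i + 1) (by omega) m
      push_cast
      rw [show i + (((pvRunB d (i + 1) n).length : Int) + 1) = (i + 1) + ((pvRunB d (i + 1) n).length : Int) by ring]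
      exact this
    | none =>
      simp only [List.length_nil, Int.ofNat_zero, add_zero]
      cases m with
      | zero => simp [pvRunB]
      | succ m => simp [pvRunB, hg]

theorem pvInnerA_eq (d : PySem.Dict Int String) (j : String) :
    ∀ (n : Nat) (e : PySem.Dict String (List String)) (i : Int),
      pvInnerA d j n (e, i) =
        ((pvRunB d i n).foldl (fun e v => e.modify j [] (fun l => l ++ [v])) e,
         i + ((pvRunB d i n).length : Int)) := by
  intro n
  induction n with
  | zero => intro e i; simp [pvInnerA, pvRunB]
  | succ n ih =>
    intro e i
    simp only [pvInnerA, pvRunB]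
    cases d.get? i with
    | some v =>
      dsimp only
      rw [ih]
      simp only [List.foldl_cons, List.length_cons]
      congr 1
      push_cast
      ring
    | none => simp

theorem pvInsert_self {κ ν : Type} [BEq κ] [LawfulBEq κ] (d : PySem.Dict κ ν) (k : κ) (v : ν)
    (hget : d.get? k = some v) (hnd : d.keys.Nodup) : d.insert k v = d := by
  have hc : d.contains k = true := by
    rw [PySem.Dict.contains_eq_isSome_get?, hget]; rfl
  apply PySem.Dict.ext
  rw [PySem.Dict.items_insert_of_contains d v hc]
  have : ∀ p ∈ d.items, (if (p.1 == k) = true then (k, v) else p) = p := by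
    intro p hp
    by_cases hpk : (p.1 == k) = true
    · have hk : p.1 = k := by simpa using hpk
      have : d.get? p.1 = some p.2 := PySem.Dict.get?_of_mem_items d (by simpa using hp) hnd
      rw [hk, hget] at this
      have hv : v = p.2 := by injection this
      simp only [if_pos hpk]
      rw [Prod.ext_iff]
      exact ⟨hk.symm, hv⟩
    · simp [hpk]
  calc List.map (fun p => if (p.1 == k) = true then (k, v) else p) d.items
      = List.map id d.items := List.map_congr_left (by simpa using this)
    _ = d.items := List.map_id d.items

theorem pvModify_modify {κ ν : Type} [BEq κ] [LawfulBEq κ] (d : PySem.Dict κ ν) (k : κ)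
    (d0 d1 : ν) (f g : ν → ν) :
    (d.modify k d0 f).modify k d1 g = d.modify k d0 (fun x => g (f x)) := by
  simp [PySem.Dict.modify, PySem.Dict.getD_insert_self, PySem.Dict.insert_insert_self]

theorem pvModify_nil (e : PySem.Dict String (List String)) (j : String)
    (hnd : e.keys.Nodup) (hc : e.contains j = true) :
    e.modify j [] (fun l => l ++ ([] : List String)) = e := by
  have hsome : ∃ v, e.get? j = some v := by
    rw [PySem.Dict.contains_eq_isSome_get?] at hc
    exact Option.isSome_iff_exists.mp hc
  obtain ⟨v, hv⟩ := hsome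
  have : e.getD j [] = v := by rw [PySem.Dict.getD_eq_get?_getD, hv]; rfl
  simp only [PySem.Dict.modify, List.append_nil, this]
  exact pvInsert_self e j v hv hnd

theorem pvFoldl_modify (j : String) :
    ∀ (vs : List String) (e : PySem.Dict String (List String)),
      e.keys.Nodup → e.contains j = true →
      vs.foldl (fun e v => e.modify j [] (fun l => l ++ [v])) e = e.modify j [] (fun l => l ++ vs) := by
  intro vs
  induction vs with
  | nil =>
    intro e hnd hc
    simp only [List.foldl_nil]
    exact (pvModify_nil e j hnd hc).symm
  | cons v vs ih =>
    intro e hnd hc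
    simp only [List.foldl_cons]
    have hnd' : (e.modify j [] (fun l => l ++ [v])).keys.Nodup := by
      rw [PySem.Dict.keys_modify, PySem.Dict.keys_insert_of_contains _ _ hc]
      exact hnd
    have hc' : (e.modify j [] (fun l => l ++ [v])).contains j = true := by
      rw [PySem.Dict.contains_modify]; simp
    rw [ih _ hnd' hc', pvModify_modify]
    congr 1
    funext l
    simp

theorem pvContains_foldl_insert (j : String) :
    ∀ (l : List String) (e : PySem.Dict String (List String)),
      j ∈ l ∨ e.contains j = true →
      (l.foldl (fun e j => e.insert j ([] : List String)) e).contains j = true := by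
  intro l
  induction l with
  | nil => intro e h; simpa using h
  | cons x l ih =>
    intro e h
    simp only [List.foldl_cons]
    apply ih
    rcases h with h | h
    · rcases List.mem_cons.mp h with h | h
      · right; rw [PySem.Dict.contains_insert]; simp [h]
      · left; exact h
    · right; rw [PySem.Dict.contains_insert]; simp [h]

-- the chunk of the run that day number idx0 receives, and the index bookkeeping
theorem pvChunk (d : PySem.Dict Int String) (step F : Nat) (idx0 : Nat)
    (h1 : (idx0 + 1) * step ≤ F) :
    pvRunB d (1 + ((min (idx0 * step) (pvRunB d 1 F).length : Nat) : Int)) step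
        = ((pvRunB d 1 F).drop (idx0 * step)).take step
      ∧ min (idx0 * step) (pvRunB d 1 F).length
          + (((pvRunB d 1 F).drop (idx0 * step)).take step).length
        = min ((idx0 + 1) * step) (pvRunB d 1 F).length := by
  set run := pvRunB d 1 F with hrun
  have hNF : run.length ≤ F := pvRunB_len_le d F 1
  by_cases hk : idx0 * step ≤ run.length
  · set k := idx0 * step with hkdef
    have hkF : k ≤ F := by
      have : k ≤ (idx0 + 1) * step := by
        rw [hkdef]; exact Nat.mul_le_mul_right step (by omega)
      omega
    have hksF : k + step ≤ F := by
      have : k + step = (idx0 + 1) * step := by rw [hkdef]; ring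
      omega
    have hpref : pvRunB d 1 k = run.take k := pvRunB_take d k F 1 hkF
    have hpreflen : (pvRunB d 1 k).length = k := by
      rw [hpref, List.length_take]; omega
    have hsplit : pvRunB d 1 (k + (F - k)) = pvRunB d 1 k ++ pvRunB d (1 + (k : Int)) (F - k) :=
      pvRunB_split d k (F - k) 1 hpreflen
    rw [show k + (F - k) = F by omega] at hsplit
    have hdrop : run.drop k = pvRunB d (1 + (k : Int)) (F - k) := by
      rw [hrun, hsplit, List.drop_append_of_le_length (by omega)]
      rw [List.drop_eq_nil_of_le (by omega), List.nil_append]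
    have hmin : min k run.length = k := by omega
    constructor
    · rw [hmin, hdrop]
      exact pvRunB_take d step (F - k) (1 + (k : Int)) (by omega)
    · rw [hmin, List.length_take, List.length_drop]
      have : (idx0 + 1) * step = k + step := by rw [hkdef]; ring
      omega
  · -- run exhausted before this day: its chunk is empty
    replace hk : run.length < idx0 * step := Nat.lt_of_not_le hk
    have hstep : 1 ≤ step := by
      by_contra h
      have : step = 0 := by omega
      simp [this] at hk
    have hNltF : run.length < F := by
      have : idx0 * step < (idx0 + 1) * step := by
        have := Nat.mul_lt_mul_of_lt_of_le (Nat.lt_succ_self idx0) (Nat.le_refl step) (by omega)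
        omega
      omega
    have hmin : min (idx0 * step) run.length = run.length := by omega
    have hempty : pvRunB d (1 + ((run.length : Nat) : Int)) step = [] := by
      have := pvRunB_stop d F 1 (by rw [← hrun]; omega) step
      rw [← hrun] at this
      exact this
    have hdropnil : run.drop (idx0 * step) = [] := List.drop_eq_nil_of_le (by omega)
    constructor
    · rw [hmin, hdropnil, hempty]; simp
    · rw [hmin, hdropnil]
      simp only [List.take_nil, List.length_nil, add_zero]
      have : run.length ≤ (idx0 + 1) * step := by
        have : idx0 * step ≤ (idx0 + 1) * step := Nat.mul_le_mul_right step (by omega)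
        omega
      omega

-- the two day-filling folds agree, day by day
theorem pvOuter (d : PySem.Dict Int String) (step : Nat) (jours : List String) :
    ∀ (js : List String) (idx0 : Nat) (e : PySem.Dict String (List String)),
      idx0 + js.length = jours.length →
      e.keys.Nodup → (∀ x ∈ js, e.contains x = true) →
      (js.foldl (fun s jour => pvInnerA d jour step s)
        (e, 1 + ((min (idx0 * step) (pvRunB d 1 (jours.length * step)).length : Nat) : Int))).1
      = (js.foldl (fun (p : PySem.Dict String (List String) × Nat) jour =>
          (p.1.modify jour []
            (fun l => l ++ PySem.List.slice (pvRunB d 1 (jours.length * step))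
                            (some ((p.2 * step : Nat) : Int))
                            (some (((p.2 + 1) * step : Nat) : Int))),
           p.2 + 1)) (e, idx0)).1 := by
  intro js
  induction js with
  | nil => intro idx0 e _ _ _; rfl
  | cons j js ih =>
    intro idx0 e hlen hnd hcont
    simp only [List.foldl_cons]
    have hcap : (idx0 + 1) * step ≤ jours.length * step := by
      apply Nat.mul_le_mul_right
      simp only [List.length_cons] at hlen
      omega
    obtain ⟨hchunk, hidx⟩ := pvChunk d step (jours.length * step) idx0 hcap
    set run := pvRunB d 1 (jours.length * step) with hrundef
    have hcj : e.contains j = true := hcont j (List.mem_cons_self ..)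
    -- the A-side inner loop for day j
    rw [pvInnerA_eq d j step e _]
    rw [hchunk]
    rw [pvFoldl_modify j _ e hnd hcj]
    -- the B-side slice is the same chunk
    have hslice : PySem.List.slice run (some ((idx0 * step : Nat) : Int))
        (some (((idx0 + 1) * step : Nat) : Int)) = (run.drop (idx0 * step)).take step := by
      rw [PySem.List.slice_natCast]
      congr 1
      have : (idx0 + 1) * step = idx0 * step + step := by ring
      omega
    have hstate : (1 : Int) + ((min (idx0 * step) run.length : Nat) : Int)
          + (((run.drop (idx0 * step)).take step).length : Int)
        = 1 + ((min ((idx0 + 1) * step) run.length : Nat) : Int) := by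
      push_cast [← hidx]; ring
    rw [hstate]
    have hnd' : (e.modify j [] (fun l => l ++ (run.drop (idx0 * step)).take step)).keys.Nodup := by
      rw [PySem.Dict.keys_modify, PySem.Dict.keys_insert_of_contains _ _ hcj]
      exact hnd
    have hcont' : ∀ x ∈ js,
        (e.modify j [] (fun l => l ++ (run.drop (idx0 * step)).take step)).contains x = true := by
      intro x hx
      rw [PySem.Dict.contains_modify]
      simp [hcont x (List.mem_cons_of_mem _ hx)]
    have := ih (idx0 + 1) (e.modify j [] (fun l => l ++ (run.drop (idx0 * step)).take step))
      (by simp only [List.length_cons] at hlen; omega) hnd' hcont'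
    rw [this, hslice]

-- ===== VERDICT (by name: the statement is the Claim_ definition above) =====
theorem emploiDuTemps_spec : Claim_equal_emploiDuTemps := by
  intro dico _ _
  unfold Spec_emploiDuTemps
  simp only [emploiDuTemps, emploiDuTemps_alt]
  cases hmax : PySem.List.max? (PySem.Dict.ofList dico).keys (fun x => x) with
  | none => rfl
  | some last_key =>
    dsimp only
    have hra : (if PySem.Int.mod last_key 5 ≠ 0 then PySem.Int.floordiv last_key 5 + 1
                else PySem.Int.floordiv last_key 5)
             = PySem.Int.floordiv last_key 5 + (if PySem.Int.mod last_key 5 ≠ 0 then 1 else 0) := by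
      split_ifs <;> ring
    have htn : (PySem.Int.floordiv last_key 5 + (if PySem.Int.mod last_key 5 ≠ 0 then 1 else 0)).toNat
             = (max (PySem.Int.floordiv last_key 5 + (if PySem.Int.mod last_key 5 ≠ 0 then 1 else 0)) 0).toNat := by
      omega
    rw [hra, htn]
    simp only [ge_iff_le]
    have hnd0 : (List.foldl (fun e j => e.insert j ([] : List String)) PySem.Dict.empty
        (if 4 ≤ PySem.Int.mod last_key 5
         then ["lundi", "mardi", "mercredi", "jeudi", "vendredi", "samedi"] ++ ["samedi"]
         else ["lundi", "mardi", "mercredi", "jeudi", "vendredi", "samedi"])).keys.Nodup :=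
      PySem.Dict.nodup_keys_foldl_insert _ (fun _ _ => ([] : List String))
        PySem.Dict.empty (by rw [PySem.Dict.keys_empty]; exact List.nodup_nil)
    have hcont0 : ∀ x ∈ (if 4 ≤ PySem.Int.mod last_key 5
         then ["lundi", "mardi", "mercredi", "jeudi", "vendredi", "samedi"] ++ ["samedi"]
         else ["lundi", "mardi", "mercredi", "jeudi", "vendredi", "samedi"]),
        (List.foldl (fun e j => e.insert j ([] : List String)) PySem.Dict.empty
          (if 4 ≤ PySem.Int.mod last_key 5
           then ["lundi", "mardi", "mercredi", "jeudi", "vendredi", "samedi"] ++ ["samedi"]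
           else ["lundi", "mardi", "mercredi", "jeudi", "vendredi", "samedi"])).contains x = true := by
      intro x hx
      exact pvContains_foldl_insert x _ PySem.Dict.empty (Or.inl hx)
    have h := pvOuter (PySem.Dict.ofList dico)
      ((max (PySem.Int.floordiv last_key 5 + (if PySem.Int.mod last_key 5 ≠ 0 then 1 else 0)) 0).toNat)
      (if 4 ≤ PySem.Int.mod last_key 5
       then ["lundi", "mardi", "mercredi", "jeudi", "vendredi", "samedi"] ++ ["samedi"]
       else ["lundi", "mardi", "mercredi", "jeudi", "vendredi", "samedi"])
      (if 4 ≤ PySem.Int.mod last_key 5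
       then ["lundi", "mardi", "mercredi", "jeudi", "vendredi", "samedi"] ++ ["samedi"]
       else ["lundi", "mardi", "mercredi", "jeudi", "vendredi", "samedi"])
      0 _ (Nat.zero_add _) hnd0 hcont0
    simp only [Nat.zero_mul, Nat.zero_min, Nat.cast_zero, add_zero] at h
    exact congrArg PySem.Dict.items h
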